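-- pv_equiv track=rewrite | github.com/aldoremiae-e/BOJ | 프로그래머스/lv0/120816. 피자 나눠 먹기 （3）/피자 나눠 먹기 （3）.py | solution
-- ===== SOURCE A (Python) =====
-- def solution(s, n):
--     answer = 0
--     i = 1
--     while True:
--         if (i * s) >= n:
--             answer = i
--             break
--         i += 1
--
--     return answer
-- ===== SOURCE B (Python) =====
-- def solution(s, n):
--     return max(1, (n + s - 1) // s)
-- ===== Notes on version B (the rewrite author's own statement) =====
-- stated objective: faster
-- what changed: replaced the linear while-loop search for the first i with i*s >= n by the closed-form ceiling division max(1, (n+s-1)//s)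
-- outside the precondition, e.g. on solution(-2, -5): A returns 1, B returns 4; on solution(0, 5): A does not finish within the time limit, B raises ZeroDivisionError
import Mathlib
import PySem

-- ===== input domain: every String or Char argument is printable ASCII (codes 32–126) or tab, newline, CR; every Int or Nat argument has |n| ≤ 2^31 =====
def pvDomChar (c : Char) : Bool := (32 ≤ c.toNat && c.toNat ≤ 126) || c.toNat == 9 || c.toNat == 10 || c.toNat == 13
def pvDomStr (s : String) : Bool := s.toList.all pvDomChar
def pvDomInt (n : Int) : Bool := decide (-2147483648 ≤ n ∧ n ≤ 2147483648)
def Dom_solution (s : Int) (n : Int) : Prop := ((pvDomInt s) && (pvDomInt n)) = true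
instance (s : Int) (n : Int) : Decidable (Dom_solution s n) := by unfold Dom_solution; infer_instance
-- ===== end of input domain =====

-- B replaces A's linear search for the first i with i*s >= n by the closed form max(1, (n+s-1)//s): asymptotically faster.


-- ===== PORT A =====
-- A's unbounded 'while True' loop, transliterated with fuel; the fuel (n-s).toNat+1 is
-- enough for every input in Pre_solution (proved below), so it only makes the port total.
def solutionLoop : Nat → Int → Int → Int → Int
  | 0, _, _, _ => 0
  | fuel + 1, s, n, i => if i * s ≥ n then i else solutionLoop fuel s n (i + 1)

def solution (s : Int) (n : Int) : Int := solutionLoop ((n - s).toNat + 1) s n 1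

-- ===== PORT B =====
def solution_alt (s : Int) (n : Int) : Int := max 1 (PySem.Int.floordiv (n + s - 1) s)

-- ===== PRECONDITION & SPEC =====
-- Pre_ excludes s ≤ 0, the degenerate non-positive slice count: there A's loop diverges
-- whenever n > s, and on n ≤ s it returns 1 only as an accident of the first iteration's
-- test (i*s >= n with a non-positive s); B's ceiling division is not defined for s = 0
-- and gives a floor-toward-minus-infinity value for s < 0.
def Pre_solution (s : Int) (n : Int) : Prop := 1 ≤ s
instance (s : Int) (n : Int) : Decidable (Pre_solution s n) := by unfold Pre_solution; infer_instance
def pvWitness_solution : Int × Int := (2, 7)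
def Spec_solution (s : Int) (n : Int) (out : Int) : Prop := out = solution_alt s n
instance (s : Int) (n : Int) (out : Int) : Decidable (Spec_solution s n out) := by unfold Spec_solution; infer_instance

-- ===== CLAIM (what is proved, stated in full; the proofs are below) =====
def Claim_equal_solution : Prop := ∀ (s : Int) (n : Int), Dom_solution s n → Pre_solution s n → Spec_solution s n (solution s n)

-- ===== LEMMAS AND PROOFS =====

-- For 1 ≤ s:  n ≤ i*s  ↔  (n+s-1)//s ≤ i   (the loop's exit test is 'i has reached the ceiling').
theorem pv_exit_iff (s n i : Int) (hs : 1 ≤ s) :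
    n ≤ i * s ↔ PySem.Int.floordiv (n + s - 1) s ≤ i := by
  rw [show (PySem.Int.floordiv (n + s - 1) s ≤ i ↔ ¬ (i + 1 ≤ PySem.Int.floordiv (n + s - 1) s)) by omega,
      PySem.Int.le_floordiv_iff_mul_le (by omega)]
  constructor
  · intro h; nlinarith
  · intro h; nlinarith

-- Loop invariant: starting at i with 1 ≤ i ≤ T := solution_alt s n and fuel > T - i,
-- the loop returns T.
theorem pv_loop_eq (s n : Int) (hs : 1 ≤ s) :
    ∀ (fuel : Nat) (i : Int), 1 ≤ i → i ≤ solution_alt s n →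
      solution_alt s n - i < fuel → solutionLoop fuel s n i = solution_alt s n := by
  intro fuel
  induction fuel with
  | zero => intro i _ hle hf; omega
  | succ k ih =>
    intro i hi hle hf
    simp only [solutionLoop]
    split
    · rename_i h
      have := (pv_exit_iff s n i hs).mp h
      have : solution_alt s n ≤ i := by
        simp only [solution_alt]; omega
      omega
    · rename_i h
      have h2 : ¬ PySem.Int.floordiv (n + s - 1) s ≤ i := fun hc => h ((pv_exit_iff s n i hs).mpr hc)
      have hT : i + 1 ≤ solution_alt s n := by
        simp only [solution_alt]; omega
      exact ih (i + 1) (by omega) hT (by omega)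

-- Fuel sufficiency: solution_alt s n ≤ (n - s).toNat + 1 when 1 ≤ s.
theorem pv_fuel_enough (s n : Int) (hs : 1 ≤ s) :
    solution_alt s n - 1 < ((n - s).toNat + 1 : Nat) := by
  have hub : PySem.Int.floordiv (n + s - 1) s ≤ max 1 (n - s + 1) := by
    by_contra hc
    have h1 : max 1 (n - s + 1) + 1 ≤ PySem.Int.floordiv (n + s - 1) s := by omega
    rw [PySem.Int.le_floordiv_iff_mul_le (by omega)] at h1
    rcases le_or_gt n s with hns | hns
    · have : max 1 (n - s + 1) = 1 := by omega
      rw [this] at h1; nlinarith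
    · have : max 1 (n - s + 1) = n - s + 1 := by omega
      rw [this] at h1; nlinarith
  simp only [solution_alt]
  omega

-- ===== VERDICT (by name: the statement is the Claim_ definition above) =====
theorem solution_spec : Claim_equal_solution := by
  intro s n _ hpre
  have halt_pos : 1 ≤ solution_alt s n := le_max_left _ _
  exact pv_loop_eq s n hpre _ 1 le_rfl halt_pos (pv_fuel_enough s n hpre)
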